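-- pv_equiv track=rewrite | github.com/Hyusicul/ppp_hw_parkhyeon | hw10_data/ppp_hw10_data.py | get_rain_all_events
-- ===== SOURCE A (Python) =====
-- def get_rain_all_events(rainfalls):
--     events=[]
--     c_days=0
--     for rain in rainfalls:
--         if rain >0:
--             c_days+=rain
--         else:
--             if c_days>0:
--                 events.append(c_days)
--             c_days=0
--     if c_days>0:
--         events.append(c_days)
--     return events
-- ===== SOURCE B (Python) =====
-- def get_rain_all_events(rainfalls):
--     # run-splitting: scan for maximal runs of positive values, sum each run
--     events = []
--     i = 0
--     n = len(rainfalls)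
--     while i < n:
--         if rainfalls[i] > 0:
--             s = 0
--             j = i
--             while j < n and rainfalls[j] > 0:
--                 s += rainfalls[j]
--                 j += 1
--             events.append(s)
--             i = j
--         else:
--             i += 1
--     return events
-- ===== Notes on version B (the rewrite author's own statement) =====
-- stated objective: alternative
-- what changed: B splits the list into maximal runs of positive values with an index-based run scanner and appends each run's sum, instead of threading a single accumulator through a flat loop with a trailing flush.
import Mathlib
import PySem

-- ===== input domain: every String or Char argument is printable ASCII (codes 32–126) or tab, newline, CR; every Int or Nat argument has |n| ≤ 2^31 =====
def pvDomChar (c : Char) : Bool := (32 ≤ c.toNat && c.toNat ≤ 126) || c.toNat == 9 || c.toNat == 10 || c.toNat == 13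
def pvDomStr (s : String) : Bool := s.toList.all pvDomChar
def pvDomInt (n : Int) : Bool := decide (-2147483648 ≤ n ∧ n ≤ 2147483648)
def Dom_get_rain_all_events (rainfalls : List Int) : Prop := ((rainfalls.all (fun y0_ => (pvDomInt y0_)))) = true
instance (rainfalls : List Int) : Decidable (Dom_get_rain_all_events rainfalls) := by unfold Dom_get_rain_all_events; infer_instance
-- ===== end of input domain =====

-- B replaces A's flat accumulator loop (with trailing flush) by an index-based scanner
-- that splits the list into maximal positive runs and appends each run's sum (alternative decomposition).


-- ===== PORT A =====
-- A's loop body: state is (events, c_days)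
def pvStepA (st : List Int × Int) (rain : Int) : List Int × Int :=
  if rain > 0 then (st.1, st.2 + rain)
  else (if st.2 > 0 then st.1 ++ [st.2] else st.1, 0)

def get_rain_all_events (rainfalls : List Int) : List Int :=
  let st := rainfalls.foldl pvStepA ([], 0)
  if st.2 > 0 then st.1 ++ [st.2] else st.1

-- ===== PORT B =====
-- inner while loop of B: scan the run of positives starting at j, accumulating s
-- (fuel only makes the recursion structural; rf.length fuel always suffices)
def pvRun (rf : List Int) : Nat → Nat → Int → Nat × Int
  | 0, j, s => (j, s)
  | f + 1, j, s =>
      if j < rf.length ∧ 0 < rf.getD j 0 then pvRun rf f (j + 1) (s + rf.getD j 0)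
      else (j, s)

-- outer while loop of B over index i (fuel rf.length + 1 suffices: i strictly increases)
def pvGo (rf : List Int) : Nat → Nat → List Int
  | 0, _ => []
  | f + 1, i =>
      if i < rf.length then
        if 0 < rf.getD i 0 then
          (pvRun rf rf.length i 0).2 :: pvGo rf f (pvRun rf rf.length i 0).1
        else pvGo rf f (i + 1)
      else []

def get_rain_all_events_alt (rainfalls : List Int) : List Int :=
  pvGo rainfalls (rainfalls.length + 1) 0

-- ===== PRECONDITION & SPEC =====
def Spec_get_rain_all_events (rainfalls : List Int) (out : List Int) : Prop := out = get_rain_all_events_alt rainfalls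
instance (rainfalls : List Int) (out : List Int) : Decidable (Spec_get_rain_all_events rainfalls out) := by unfold Spec_get_rain_all_events; infer_instance

-- ===== CLAIM (what is proved, stated in full; the proofs are below) =====
def Claim_equal_get_rain_all_events : Prop := ∀ (rainfalls : List Int), Dom_get_rain_all_events rainfalls → Spec_get_rain_all_events rainfalls (get_rain_all_events rainfalls)

-- ===== LEMMAS AND PROOFS =====

theorem pvRun_stop (rf : List Int) (f j : Nat) (s : Int)
    (h : ¬(j < rf.length ∧ 0 < rf.getD j 0)) : pvRun rf f j s = (j, s) := by
  cases f with
  | zero => rfl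
  | succ f => rw [pvRun, if_neg h]

theorem pvRun_ge (rf : List Int) : ∀ (f j : Nat) (s : Int), j ≤ (pvRun rf f j s).1 := by
  intro f
  induction f with
  | zero => intro j s; simp [pvRun]
  | succ f ih =>
    intro j s
    rw [pvRun]
    split
    · exact le_trans (by omega) (ih (j + 1) _)
    · simp

theorem pvRun_fuel (rf : List Int) : ∀ (f₁ f₂ j : Nat) (s : Int),
    rf.length - j ≤ f₁ → rf.length - j ≤ f₂ → pvRun rf f₁ j s = pvRun rf f₂ j s := by
  intro f₁
  induction f₁ with
  | zero =>
    intro f₂ j s h1 h2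
    have hc : ¬(j < rf.length ∧ 0 < rf.getD j 0) := by
      intro hh; omega
    rw [pvRun_stop rf 0 j s hc, pvRun_stop rf f₂ j s hc]
  | succ f₁ ih =>
    intro f₂ j s h1 h2
    by_cases hc : j < rf.length ∧ 0 < rf.getD j 0
    · cases f₂ with
      | zero => omega
      | succ f₂ =>
        rw [pvRun, pvRun, if_pos hc, if_pos hc]
        exact ih f₂ (j + 1) _ (by omega) (by omega)
    · rw [pvRun_stop rf _ j s hc, pvRun_stop rf f₂ j s hc]

theorem pvRun_step (rf : List Int) (f j : Nat) (s : Int)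
    (h1 : j < rf.length) (h2 : 0 < rf.getD j 0) (hf : rf.length - j ≤ f) :
    pvRun rf f j s = pvRun rf rf.length (j + 1) (s + rf.getD j 0) := by
  cases f with
  | zero => omega
  | succ f =>
    rw [pvRun, if_pos ⟨h1, h2⟩]
    exact pvRun_fuel rf f rf.length (j + 1) _ (by omega) (by omega)

theorem pvRun_gt (rf : List Int) (j : Nat) (s : Int)
    (h1 : j < rf.length) (h2 : 0 < rf.getD j 0) :
    j < (pvRun rf rf.length j s).1 := by
  rw [pvRun_step rf rf.length j s h1 h2 (by omega)]
  have := pvRun_ge rf rf.length (j + 1) (s + rf.getD j 0)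
  omega

theorem pvGo_fuel (rf : List Int) : ∀ (f₁ f₂ i : Nat),
    rf.length - i < f₁ → rf.length - i < f₂ → pvGo rf f₁ i = pvGo rf f₂ i := by
  intro f₁
  induction f₁ with
  | zero => intro f₂ i h1 h2; omega
  | succ f₁ ih =>
    intro f₂ i h1 h2
    cases f₂ with
    | zero => omega
    | succ f₂ =>
      by_cases hi : i < rf.length
      · by_cases hp : 0 < rf.getD i 0
        · have hgt : i < (pvRun rf rf.length i 0).1 := pvRun_gt rf i 0 hi hp
          rw [pvGo, pvGo, if_pos hi, if_pos hi, if_pos hp, if_pos hp]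
          rw [ih f₂ _ (by omega) (by omega)]
        · rw [pvGo, pvGo, if_pos hi, if_pos hi, if_neg hp, if_neg hp]
          exact ih f₂ (i + 1) (by omega) (by omega)
      · rw [pvGo, pvGo, if_neg hi, if_neg hi]

-- recursive characterisation of A's loop
def pvArec (c : Int) : List Int → List Int
  | [] => if c > 0 then [c] else []
  | x :: xs => if x > 0 then pvArec (c + x) xs
               else (if c > 0 then [c] else []) ++ pvArec 0 xs

theorem pvA_foldl (xs : List Int) : ∀ (e : List Int) (c : Int),
    (if (xs.foldl pvStepA (e, c)).2 > 0
      then (xs.foldl pvStepA (e, c)).1 ++ [(xs.foldl pvStepA (e, c)).2]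
      else (xs.foldl pvStepA (e, c)).1) = e ++ pvArec c xs := by
  induction xs with
  | nil => intro e c; simp [pvArec]; split_ifs <;> simp
  | cons x xs ih =>
    intro e c
    simp only [List.foldl_cons, pvStepA, pvArec]
    by_cases hx : x > 0
    · simp [hx, ih]
    · simp only [hx, if_false]
      rw [ih]
      split_ifs <;> simp

theorem pv_joint (rf : List Int) : ∀ (n j : Nat), rf.length - j ≤ n →
    (∀ s : Int, 0 ≤ s → (0 < s ∨ (j < rf.length ∧ 0 < rf.getD j 0)) →
        pvArec s (rf.drop j) =
          (pvRun rf rf.length j s).2 :: pvGo rf (rf.length + 1) (pvRun rf rf.length j s).1)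
    ∧ pvArec 0 (rf.drop j) = pvGo rf (rf.length + 1) j := by
  intro n
  induction n with
  | zero =>
    intro j hj
    have hlen : rf.length ≤ j := by omega
    have hd : rf.drop j = [] := List.drop_eq_nil_of_le hlen
    constructor
    · intro s hs hcase
      have hs' : 0 < s := hcase.resolve_right (fun h => absurd h.1 (by omega))
      rw [pvRun_stop rf _ j s (by intro hh; omega)]
      rw [pvGo, if_neg (by omega : ¬ j < rf.length)]
      simp [hd, pvArec, hs']
    · rw [pvGo, if_neg (by omega : ¬ j < rf.length)]
      simp [hd, pvArec]
  | succ n ih =>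
    intro j hj
    by_cases hjl : j < rf.length
    · have hd : rf.drop j = rf.getD j 0 :: rf.drop (j + 1) := by
        rw [List.getD_eq_getElem _ _ hjl]
        exact List.drop_eq_getElem_cons hjl
      have ih1 := ih (j + 1) (by omega)
      have hH : ∀ s : Int, 0 ≤ s → (0 < s ∨ (j < rf.length ∧ 0 < rf.getD j 0)) →
          pvArec s (rf.drop j) =
            (pvRun rf rf.length j s).2 :: pvGo rf (rf.length + 1) (pvRun rf rf.length j s).1 := by
        intro s hs hcase
        by_cases hx : 0 < rf.getD j 0
        · rw [hd]
          have h1 : pvArec s (rf.getD j 0 :: rf.drop (j + 1)) = pvArec (s + rf.getD j 0) (rf.drop (j + 1)) := by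
            simp only [pvArec]; rw [if_pos hx]
          rw [h1, pvRun_step rf rf.length j s hjl hx (by omega)]
          exact ih1.1 (s + rf.getD j 0) (by omega) (Or.inl (by omega))
        · have hs' : 0 < s := hcase.resolve_right (fun h => absurd h.2 hx)
          rw [hd]
          have h1 : pvArec s (rf.getD j 0 :: rf.drop (j + 1)) = s :: pvArec 0 (rf.drop (j + 1)) := by
            simp only [pvArec]; rw [if_neg (by omega : ¬ rf.getD j 0 > 0), if_pos hs']; rfl
          rw [h1, pvRun_stop rf _ j s (by intro hh; exact hx hh.2)]
          rw [pvGo, if_pos hjl, if_neg hx]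
          rw [pvGo_fuel rf rf.length (rf.length + 1) (j + 1) (by omega) (by omega)]
          rw [ih1.2]
      refine ⟨hH, ?_⟩
      by_cases hx : 0 < rf.getD j 0
      · rw [pvGo, if_pos hjl, if_pos hx]
        rw [pvGo_fuel rf rf.length (rf.length + 1) _ (by
              have := pvRun_gt rf j 0 hjl hx; omega) (by omega)]
        exact hH 0 le_rfl (Or.inr ⟨hjl, hx⟩)
      · rw [pvGo, if_pos hjl, if_neg hx]
        rw [hd]
        have h1 : pvArec 0 ((rf.getD j 0) :: rf.drop (j + 1)) = pvArec 0 (rf.drop (j + 1)) := by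
          simp only [pvArec]; rw [if_neg (by omega : ¬ rf.getD j 0 > 0)]; simp
        rw [h1, pvGo_fuel rf rf.length (rf.length + 1) (j + 1) (by omega) (by omega)]
        exact ih1.2
    · have hd : rf.drop j = [] := List.drop_eq_nil_of_le (by omega)
      constructor
      · intro s hs hcase
        have hs' : 0 < s := hcase.resolve_right (fun h => absurd h.1 hjl)
        rw [pvRun_stop rf _ j s (by intro hh; exact hjl hh.1)]
        rw [pvGo, if_neg hjl]
        simp [hd, pvArec, hs']
      · rw [pvGo, if_neg hjl]
        simp [hd, pvArec]

-- ===== VERDICT (by name: the statement is the Claim_ definition above) =====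
theorem get_rain_all_events_spec : Claim_equal_get_rain_all_events := by
  intro rf _
  show get_rain_all_events rf = get_rain_all_events_alt rf
  unfold get_rain_all_events get_rain_all_events_alt
  have h1 := pvA_foldl rf [] 0
  simp only [List.nil_append] at h1
  rw [h1]
  have h2 := (pv_joint rf rf.length 0 (by omega)).2
  simpa using h2
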